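-- pv_equiv track=rewrite | github.com/elcaza/proyecto_final_pbsi | app.py | obtener_cifrados_grafica
-- ===== SOURCE A (Python) =====
-- def obtener_cifrados_grafica(peticion_proceso):
--     '''
--         Funcion que regresa el total de cifrados debiles, recomendados y seguros
--
--         Parametros
--         ----------
--         peticion_proceso : dict
--             diccionario que contiene el resultado del analisis
--     '''
--     resultados_grafica = [0,0,0]
--     if len(peticion_proceso["analisis"]["cifrados"]) != 0:
--         for dato in peticion_proceso["analisis"]["cifrados"]:
--             if peticion_proceso["analisis"]["cifrados"][dato] == "debil":
--                 resultados_grafica[0] += 1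
--             if peticion_proceso["analisis"]["cifrados"][dato] == "recomendado":
--                 resultados_grafica[1] += 1
--             if peticion_proceso["analisis"]["cifrados"][dato] == "seguro":
--                 resultados_grafica[2] += 1
--         return resultados_grafica
--     return [0,0,0]
-- ===== SOURCE B (Python) =====
-- def obtener_cifrados_grafica(peticion_proceso):
--     cif = peticion_proceso["analisis"]["cifrados"]
--     return [sum(1 for v in cif.values() if v == "debil"),
--             sum(1 for v in cif.values() if v == "recomendado"),
--             sum(1 for v in cif.values() if v == "seguro")]
-- ===== Notes on version B (the rewrite author's own statement) =====
-- stated objective: idiomatic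
-- what changed: Replaces the single key-iterating loop (with three interleaved if-counters, per-key dict re-indexing and a redundant empty-dict guard) by three direct sum-comprehensions over the dict's values, one per category; Pre_ only excludes association lists with duplicate keys, which do not represent a Python dict.
import Mathlib
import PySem

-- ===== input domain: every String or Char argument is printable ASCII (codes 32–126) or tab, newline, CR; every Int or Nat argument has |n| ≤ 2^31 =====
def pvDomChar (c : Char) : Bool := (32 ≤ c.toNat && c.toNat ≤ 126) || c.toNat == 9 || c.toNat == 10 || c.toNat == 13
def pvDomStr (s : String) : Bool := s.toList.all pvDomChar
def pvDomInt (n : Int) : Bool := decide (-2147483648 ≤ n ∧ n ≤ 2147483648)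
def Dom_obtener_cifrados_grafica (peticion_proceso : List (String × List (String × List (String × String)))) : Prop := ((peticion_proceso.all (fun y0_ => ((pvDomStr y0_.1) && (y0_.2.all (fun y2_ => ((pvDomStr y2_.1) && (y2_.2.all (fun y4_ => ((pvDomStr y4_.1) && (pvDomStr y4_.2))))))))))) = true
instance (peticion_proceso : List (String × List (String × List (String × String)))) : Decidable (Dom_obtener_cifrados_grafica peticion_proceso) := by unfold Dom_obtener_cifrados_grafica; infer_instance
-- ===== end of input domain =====

-- B replaces A's single key-iterating loop (three interleaved if-counters with per-key dict
-- re-indexing, plus a redundant empty-dict guard) by three direct value scans, one per category.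

-- ===== PORT A =====
-- dict indexing d[k] is first-match lookup on the association list (List.lookup);
-- missing keys (KeyError in Python) are outside Pre_ and defaulted.
def obtener_cifrados_grafica (peticion_proceso : List (String × List (String × List (String × String)))) : List Int :=
  let analisis := (List.lookup "analisis" peticion_proceso).getD []
  let cif := (List.lookup "cifrados" analisis).getD []
  if cif.length ≠ 0 then
    -- for dato in cifrados: three independent ifs on cifrados[dato], mutating resultados_grafica
    let res := cif.foldl (fun (acc : Int × Int × Int) dato =>
      let v := (List.lookup dato.1 cif).getD ""
      let a := if v == "debil" then acc.1 + 1 else acc.1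
      let b := if v == "recomendado" then acc.2.1 + 1 else acc.2.1
      let c := if v == "seguro" then acc.2.2 + 1 else acc.2.2
      (a, b, c)) (0, 0, 0)
    [res.1, res.2.1, res.2.2]
  else [0, 0, 0]

-- ===== PORT B =====
def obtener_cifrados_grafica_alt (peticion_proceso : List (String × List (String × List (String × String)))) : List Int :=
  let cif := (List.lookup "cifrados" ((List.lookup "analisis" peticion_proceso).getD [])).getD []
  [ ((cif.map Prod.snd).countP (fun v => v == "debil") : Int),
    ((cif.map Prod.snd).countP (fun v => v == "recomendado") : Int),
    ((cif.map Prod.snd).countP (fun v => v == "seguro") : Int) ]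

-- ===== PRECONDITION & SPEC =====
-- Pre_ requires the "analisis" and "cifrados" keys to exist (Python raises KeyError otherwise) and
-- excludes association lists whose "cifrados" dict has duplicate keys, which never represent a Python dict.
def Pre_obtener_cifrados_grafica (peticion_proceso : List (String × List (String × List (String × String)))) : Prop :=
  (List.lookup "analisis" peticion_proceso).isSome = true ∧
  (List.lookup "cifrados" ((List.lookup "analisis" peticion_proceso).getD [])).isSome = true ∧
  (((List.lookup "cifrados" ((List.lookup "analisis" peticion_proceso).getD [])).getD []).map Prod.fst).Nodup
instance (peticion_proceso : List (String × List (String × List (String × String)))) : Decidable (Pre_obtener_cifrados_grafica peticion_proceso) := by unfold Pre_obtener_cifrados_grafica; infer_instance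

def pvWitness_obtener_cifrados_grafica : (List (String × List (String × List (String × String)))) :=
  [("analisis", [("cifrados", [("a", "debil"), ("b", "seguro")])])]

def Spec_obtener_cifrados_grafica (peticion_proceso : List (String × List (String × List (String × String)))) (out : List Int) : Prop := out = obtener_cifrados_grafica_alt peticion_proceso
instance (peticion_proceso : List (String × List (String × List (String × String)))) (out : List Int) : Decidable (Spec_obtener_cifrados_grafica peticion_proceso out) := by unfold Spec_obtener_cifrados_grafica; infer_instance

-- ===== CLAIM (what is proved, stated in full; the proofs are below) =====
def Claim_equal_obtener_cifrados_grafica : Prop := ∀ (peticion_proceso : List (String × List (String × List (String × String)))), Dom_obtener_cifrados_grafica peticion_proceso → Pre_obtener_cifrados_grafica peticion_proceso → Spec_obtener_cifrados_grafica peticion_proceso (obtener_cifrados_grafica peticion_proceso)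

-- ===== LEMMAS AND PROOFS =====

-- first-match lookup of a present key in a list with nodup keys returns that pair's value
theorem lookup_of_mem_nodup {β : Type} (c : List (String × β)) (h : (c.map Prod.fst).Nodup)
    (kv : String × β) (hm : kv ∈ c) : List.lookup kv.1 c = some kv.2 := by
  induction c with
  | nil => cases hm
  | cons hd tl ih =>
    simp only [List.map_cons, List.nodup_cons] at h
    rcases List.mem_cons.mp hm with heq | hm
    · cases heq; simp [List.lookup]
    · have hne : (kv.1 == hd.1) = false := by
        apply beq_eq_false_iff_ne.mpr
        intro he; exact h.1 (he ▸ List.mem_map_of_mem hm)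
      simp only [List.lookup, hne]
      exact ih h.2 hm

theorem fold_count (cif : List (String × String)) (l : List (String × String))
    (h : ∀ kv ∈ l, List.lookup kv.1 cif = some kv.2) (d r s : Int) :
    l.foldl (fun (acc : Int × Int × Int) dato =>
      (if ((List.lookup dato.1 cif).getD "" == "debil") = true then acc.1 + 1 else acc.1,
       if ((List.lookup dato.1 cif).getD "" == "recomendado") = true then acc.2.1 + 1 else acc.2.1,
       if ((List.lookup dato.1 cif).getD "" == "seguro") = true then acc.2.2 + 1 else acc.2.2)) (d, r, s)
    = (d + (l.countP (fun kv => kv.2 == "debil") : Int),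
       r + (l.countP (fun kv => kv.2 == "recomendado") : Int),
       s + (l.countP (fun kv => kv.2 == "seguro") : Int)) := by
  induction l generalizing d r s with
  | nil => simp
  | cons hd tl ih =>
    have hhd : List.lookup hd.1 cif = some hd.2 := h hd (List.mem_cons_self ..)
    simp only [List.foldl_cons, List.countP_cons, hhd, Option.getD_some,
      ih (fun kv hm => h kv (List.mem_cons_of_mem _ hm))]
    split_ifs <;> simp_all <;> omega

-- ===== VERDICT (by name: the statement is the Claim_ definition above) =====
theorem obtener_cifrados_grafica_spec : Claim_equal_obtener_cifrados_grafica := by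
  intro p _ hpre
  obtain ⟨_, _, hnd⟩ := hpre
  show _ = _
  unfold obtener_cifrados_grafica obtener_cifrados_grafica_alt
  simp only []
  generalize hg : (List.lookup "cifrados" ((List.lookup "analisis" p).getD [])).getD [] = cif at hnd ⊢
  by_cases hlen : cif.length ≠ 0
  · rw [if_pos hlen]
    rw [fold_count cif cif (fun kv hm => lookup_of_mem_nodup cif hnd kv hm)]
    simp [List.countP_map, Function.comp_def]
  · rw [if_neg hlen]
    push Not at hlen
    rw [List.length_eq_zero_iff] at hlen
    simp [hlen]
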